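-- pv_equiv track=rewrite | github.com/JRitmeester/AdventOfCode | 2025/Day 05/day05.py | get_fresh_and_spoiled
-- ===== SOURCE A (Python) =====
-- from typing import List, Tuple
--
-- RangesType = List[Tuple[int, int]]
--
-- IDsType = List[int]
--
-- def get_fresh_and_spoiled(
--     ranges: RangesType, ids: IDsType
-- ) -> tuple[set[int], set[int]]:
--     fresh = []
--     spoiled = []
--     for id in ids:
--         for start, stop in ranges:
--             if start <= id <= stop:
--                 fresh.append(id)
--             else:
--                 spoiled.append(id)
--     return set(fresh), set(spoiled)
-- ===== SOURCE B (Python) =====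
-- def get_fresh_and_spoiled(ranges, ids):
--     # One pass per id: fresh = lies in some range (any, early exit);
--     # spoiled = lies outside some range, i.e. id < max start or id > min stop.
--     if not ranges:
--         return set(), set()
--     max_start = max(s for s, _ in ranges)
--     min_stop = min(t for _, t in ranges)
--     fresh = set()
--     spoiled = set()
--     for id in ids:
--         if any(s <= id <= t for s, t in ranges):
--             fresh.add(id)
--         if id < max_start or id > min_stop:
--             spoiled.add(id)
--     return fresh, spoiled
-- ===== Notes on version B (the rewrite author's own statement) =====
-- stated objective: alternative
-- what changed: Instead of appending the id once per range into two lists and deduplicating with set() at the end, B precomputes max-start/min-stop once so the spoiled test is a single comparison per id, tests freshness with an early-exit any(), and builds both sets directly in one pass over ids.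
import Mathlib
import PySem

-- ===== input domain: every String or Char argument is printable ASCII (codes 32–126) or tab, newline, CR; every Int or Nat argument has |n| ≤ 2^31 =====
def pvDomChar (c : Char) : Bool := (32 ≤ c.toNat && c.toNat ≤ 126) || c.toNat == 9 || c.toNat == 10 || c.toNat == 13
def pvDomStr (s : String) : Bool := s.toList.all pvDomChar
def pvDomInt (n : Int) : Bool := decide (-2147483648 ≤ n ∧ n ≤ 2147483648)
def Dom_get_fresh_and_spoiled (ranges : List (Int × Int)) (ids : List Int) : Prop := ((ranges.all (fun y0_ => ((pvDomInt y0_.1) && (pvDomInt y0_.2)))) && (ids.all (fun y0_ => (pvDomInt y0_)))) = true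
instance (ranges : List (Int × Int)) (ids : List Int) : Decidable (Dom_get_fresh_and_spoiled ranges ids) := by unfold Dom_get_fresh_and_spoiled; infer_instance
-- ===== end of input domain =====

-- B replaces A's per-(id,range) double append + final set() dedup by a single pass per id:
-- an early-exit any() for fresh, a single max-start/min-stop comparison for spoiled, sets built directly.

-- ===== PORT A =====
def get_fresh_and_spoiled (ranges : List (Int × Int)) (ids : List Int) : List Int × List Int :=
  let fs := ids.foldl
    (fun acc id => ranges.foldl
      (fun acc2 r => if r.1 ≤ id ∧ id ≤ r.2 then (acc2.1 ++ [id], acc2.2) else (acc2.1, acc2.2 ++ [id]))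
      acc)
    ([], [])
  (PySem.Set.ofList fs.1, PySem.Set.ofList fs.2)

-- ===== PORT B =====
def get_fresh_and_spoiled_alt (ranges : List (Int × Int)) (ids : List Int) : List Int × List Int :=
  if ranges = [] then ([], [])
  else
    -- max(s for s,_ in ranges) / min(t for _,t in ranges); .getD 0 is unreachable (ranges ≠ [])
    let maxStart := (PySem.List.max? (ranges.map Prod.fst) (fun x => x)).getD 0
    let minStop  := (PySem.List.min? (ranges.map Prod.snd) (fun x => x)).getD 0
    ids.foldl
      (fun st id =>
        let f := if ranges.any (fun r => decide (r.1 ≤ id ∧ id ≤ r.2)) then PySem.Set.add st.1 id else st.1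
        let s := if id < maxStart ∨ minStop < id then PySem.Set.add st.2 id else st.2
        (f, s))
      (PySem.Set.empty, PySem.Set.empty)

-- ===== PRECONDITION & SPEC =====
def Spec_get_fresh_and_spoiled (ranges : List (Int × Int)) (ids : List Int) (out : List Int × List Int) : Prop := out = get_fresh_and_spoiled_alt ranges ids
instance (ranges : List (Int × Int)) (ids : List Int) (out : List Int × List Int) : Decidable (Spec_get_fresh_and_spoiled ranges ids out) := by unfold Spec_get_fresh_and_spoiled; infer_instance

-- ===== CLAIM (what is proved, stated in full; the proofs are below) =====
def Claim_equal_get_fresh_and_spoiled : Prop := ∀ (ranges : List (Int × Int)) (ids : List Int), Dom_get_fresh_and_spoiled ranges ids → Spec_get_fresh_and_spoiled ranges ids (get_fresh_and_spoiled ranges ids)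

-- ===== LEMMAS AND PROOFS =====

-- the inner loop over ranges appends id to fresh/spoiled once per (non-)containing range;
-- after set() this is a single conditional add on each side
lemma gfs_inner (ranges : List (Int × Int)) (id : Int) (F S : List Int) :
    PySem.Set.ofList ((ranges.foldl
      (fun acc2 r => if r.1 ≤ id ∧ id ≤ r.2 then (acc2.1 ++ [id], acc2.2) else (acc2.1, acc2.2 ++ [id]))
      (F, S)).1)
      = (if ranges.any (fun r => decide (r.1 ≤ id ∧ id ≤ r.2)) then PySem.Set.add (PySem.Set.ofList F) id else PySem.Set.ofList F)
    ∧ PySem.Set.ofList ((ranges.foldl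
      (fun acc2 r => if r.1 ≤ id ∧ id ≤ r.2 then (acc2.1 ++ [id], acc2.2) else (acc2.1, acc2.2 ++ [id]))
      (F, S)).2)
      = (if ranges.any (fun r => !decide (r.1 ≤ id ∧ id ≤ r.2)) then PySem.Set.add (PySem.Set.ofList S) id else PySem.Set.ofList S) := by
  induction ranges generalizing F S with
  | nil => simp
  | cons r rs ih =>
    by_cases h : r.1 ≤ id ∧ id ≤ r.2
    · have hd : decide (r.1 ≤ id ∧ id ≤ r.2) = true := decide_eq_true h
      obtain ⟨h1, h2⟩ := ih (F ++ [id]) S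
      simp only [List.foldl_cons, if_pos h, List.any_cons, hd]
      refine ⟨?_, ?_⟩
      · rw [h1, PySem.Set.ofList_append_singleton]
        simp
      · rw [h2]
        simp only [Bool.not_true, Bool.false_or]
    · have hd : decide (r.1 ≤ id ∧ id ≤ r.2) = false := decide_eq_false h
      obtain ⟨h1, h2⟩ := ih F (S ++ [id])
      simp only [List.foldl_cons, if_neg h, List.any_cons, hd]
      refine ⟨?_, ?_⟩
      · rw [h1]
        simp only [Bool.false_or]
      · rw [h2, PySem.Set.ofList_append_singleton]
        simp

-- "id lies outside some range" is exactly "id < max start or id > min stop" (ranges nonempty)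
lemma gfs_spoiled_cond (ranges : List (Int × Int)) (id : Int) (h : ranges ≠ []) :
    ranges.any (fun r => !decide (r.1 ≤ id ∧ id ≤ r.2))
      = decide (id < (PySem.List.max? (ranges.map Prod.fst) (fun x => x)).getD 0
                ∨ (PySem.List.min? (ranges.map Prod.snd) (fun x => x)).getD 0 < id) := by
  obtain ⟨ms, hms⟩ : ∃ ms, PySem.List.max? (ranges.map Prod.fst) (fun x => x) = some ms := by
    cases hm : PySem.List.max? (ranges.map Prod.fst) (fun x => x) with
    | none => rw [PySem.List.max?_eq_none_iff] at hm; exact absurd (List.map_eq_nil_iff.mp hm) h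
    | some v => exact ⟨v, rfl⟩
  obtain ⟨mt, hmt⟩ : ∃ mt, PySem.List.min? (ranges.map Prod.snd) (fun x => x) = some mt := by
    cases hm : PySem.List.min? (ranges.map Prod.snd) (fun x => x) with
    | none => rw [PySem.List.min?_eq_none_iff] at hm; exact absurd (List.map_eq_nil_iff.mp hm) h
    | some v => exact ⟨v, rfl⟩
  have hmsMem := PySem.List.max?_mem hms
  have hmsMax := PySem.List.max?_isMax hms
  have hmtMem := PySem.List.min?_mem hmt
  have hmtMin := PySem.List.min?_isMin hmt
  rw [hms, hmt]
  simp only [Option.getD_some]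
  rcases Bool.eq_false_or_eq_true (ranges.any (fun r => !decide (r.1 ≤ id ∧ id ≤ r.2))) with hA | hA
  · rw [hA]
    simp only [List.any_eq_true] at hA
    obtain ⟨r, hr, hcond⟩ := hA
    have hc : id < r.1 ∨ r.2 < id := by simpa using hcond
    have h1 : r.1 ≤ ms := by simpa using hmsMax r.1 (List.mem_map.mpr ⟨r, hr, rfl⟩)
    have h2 : mt ≤ r.2 := by simpa using hmtMin r.2 (List.mem_map.mpr ⟨r, hr, rfl⟩)
    symm
    apply decide_eq_true
    omega
  · rw [hA]
    simp only [List.any_eq_false] at hA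
    obtain ⟨rs, hrs, hrs2⟩ := List.mem_map.mp hmsMem
    obtain ⟨rt, hrt, hrt2⟩ := List.mem_map.mp hmtMem
    have h1 : rs.1 ≤ id ∧ id ≤ rs.2 := by simpa using hA rs hrs
    have h2 : rt.1 ≤ id ∧ id ≤ rt.2 := by simpa using hA rt hrt
    symm
    apply decide_eq_false
    omega

-- the outer loop, with both accumulators generalized
lemma gfs_outer (ranges : List (Int × Int)) (h : ranges ≠ []) (ids : List Int) (F S : List Int) :
    (PySem.Set.ofList ((ids.foldl
        (fun acc id => ranges.foldl
          (fun acc2 r => if r.1 ≤ id ∧ id ≤ r.2 then (acc2.1 ++ [id], acc2.2) else (acc2.1, acc2.2 ++ [id]))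
          acc)
        (F, S)).1),
     PySem.Set.ofList ((ids.foldl
        (fun acc id => ranges.foldl
          (fun acc2 r => if r.1 ≤ id ∧ id ≤ r.2 then (acc2.1 ++ [id], acc2.2) else (acc2.1, acc2.2 ++ [id]))
          acc)
        (F, S)).2))
    = ids.foldl
        (fun st id =>
          let f := if ranges.any (fun r => decide (r.1 ≤ id ∧ id ≤ r.2)) then PySem.Set.add st.1 id else st.1
          let s := if id < (PySem.List.max? (ranges.map Prod.fst) (fun x => x)).getD 0
                      ∨ (PySem.List.min? (ranges.map Prod.snd) (fun x => x)).getD 0 < id then PySem.Set.add st.2 id else st.2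
          (f, s))
        (PySem.Set.ofList F, PySem.Set.ofList S) := by
  induction ids generalizing F S with
  | nil => simp
  | cons id rest ih =>
    simp only [List.foldl_cons]
    obtain ⟨h1, h2⟩ := gfs_inner ranges id F S
    have hcond := gfs_spoiled_cond ranges id h
    rcases hinner : ranges.foldl
        (fun acc2 r => if r.1 ≤ id ∧ id ≤ r.2 then (acc2.1 ++ [id], acc2.2) else (acc2.1, acc2.2 ++ [id]))
        (F, S) with ⟨F', S'⟩
    rw [hinner] at h1 h2 ⊢
    dsimp only at h1 h2
    rw [ih F' S', h1, h2, hcond]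
    simp only [decide_eq_true_eq]

lemma gfs_empty (ids : List Int) (a : List Int × List Int) :
    ids.foldl (fun acc (_ : Int) => acc) a = a := by
  induction ids <;> simp_all

-- ===== VERDICT (by name: the statement is the Claim_ definition above) =====
theorem get_fresh_and_spoiled_spec : Claim_equal_get_fresh_and_spoiled := by
  intro ranges ids _
  unfold Spec_get_fresh_and_spoiled get_fresh_and_spoiled get_fresh_and_spoiled_alt
  by_cases h : ranges = []
  · subst h
    simp only [List.foldl_nil, if_pos]
    rw [gfs_empty]
    rfl
  · rw [if_neg h]
    simpa using gfs_outer ranges h ids [] []
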